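-- pv_equiv track=rewrite | github.com/yarik335/GeekPy | HT_4/task.py | uniq_elements
-- ===== SOURCE A (Python) =====
-- def uniq_elements(list):#make new list of unique elements of args list
--     seen = set()
--     result = []
--     for item in list:
--         if item[2] not in seen:
--             result.append(item)
--             seen.add(item[2])
--     return result
-- ===== SOURCE B (Python) =====
-- def uniq_elements(list):
--     result = []
--     rest = list
--     while rest:
--         head = rest[0]
--         result.append(head)
--         rest = [x for x in rest[1:] if x[2] != head[2]]
--     return result
-- ===== Notes on version B (the rewrite author's own statement) =====
-- stated objective: alternative
-- what changed: Replaces the single pass with a seen-set and membership branch by a selection-style worklist loop: take the head, append it, and rebuild the worklist by filtering out every later item sharing its third element, so no seen-set or membership test exists at all.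
import Mathlib
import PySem

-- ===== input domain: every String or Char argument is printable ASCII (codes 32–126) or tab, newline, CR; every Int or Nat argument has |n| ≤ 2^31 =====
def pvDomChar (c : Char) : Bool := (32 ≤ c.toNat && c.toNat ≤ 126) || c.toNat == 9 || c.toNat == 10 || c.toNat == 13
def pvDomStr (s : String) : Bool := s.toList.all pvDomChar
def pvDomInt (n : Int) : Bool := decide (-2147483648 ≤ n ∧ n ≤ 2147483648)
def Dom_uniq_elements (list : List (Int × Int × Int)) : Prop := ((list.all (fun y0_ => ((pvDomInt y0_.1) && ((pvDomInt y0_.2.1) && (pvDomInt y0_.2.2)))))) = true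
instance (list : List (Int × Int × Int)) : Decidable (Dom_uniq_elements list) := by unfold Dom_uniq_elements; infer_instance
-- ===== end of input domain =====

-- B replaces A's seen-set + membership branch by a selection-style worklist loop:
-- take the head, emit it, and filter every later item with the same third element
-- out of the worklist (alternative decomposition; not claimed faster).

-- ===== PORT A =====
def uniq_elements (list : List (Int × Int × Int)) : List (Int × Int × Int) :=
  let st := list.foldl
    (fun (st : PySem.Set Int × List (Int × Int × Int)) item =>
      if st.1.contains item.2.2 then st
      else (st.1.add item.2.2, st.2 ++ [item]))
    (PySem.Set.empty, [])
  st.2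

-- ===== PORT B =====
-- the while loop of Source B: state (result, rest); terminates because the new
-- worklist rest[1:].filter … is shorter than rest
def uniqAltLoop (result rest : List (Int × Int × Int)) : List (Int × Int × Int) :=
  match rest with
  | [] => result
  | head :: tl =>
      uniqAltLoop (result ++ [head]) (tl.filter (fun x => x.2.2 ≠ head.2.2))
termination_by rest.length
decreasing_by
  have h := List.length_filter_le (fun x : {x // x ∈ tl} => !decide ((↑x : Int×Int×Int).2.2 = head.2.2)) tl.attach
  simp at h ⊢; omega

def uniq_elements_alt (list : List (Int × Int × Int)) : List (Int × Int × Int) :=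
  uniqAltLoop [] list

-- ===== PRECONDITION & SPEC =====
def Spec_uniq_elements (list : List (Int × Int × Int)) (out : List (Int × Int × Int)) : Prop := out = uniq_elements_alt list
instance (list : List (Int × Int × Int)) (out : List (Int × Int × Int)) : Decidable (Spec_uniq_elements list out) := by unfold Spec_uniq_elements; infer_instance

-- ===== CLAIM =====
def Claim_equal_uniq_elements : Prop := ∀ (list : List (Int × Int × Int)), Dom_uniq_elements list → Spec_uniq_elements list (uniq_elements list)

-- ===== LEMMAS AND PROOFS =====

-- equation lemmas for B's worklist loop
theorem uniqAltLoop_nil (r : List (Int × Int × Int)) : uniqAltLoop r [] = r := by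
  rw [uniqAltLoop.eq_def]

theorem uniqAltLoop_cons (r : List (Int × Int × Int)) (y : Int × Int × Int)
    (ys : List (Int × Int × Int)) :
    uniqAltLoop r (y :: ys) = uniqAltLoop (r ++ [y]) (ys.filter (fun x => x.2.2 ≠ y.2.2)) := by
  rw [uniqAltLoop.eq_def]

-- A's loop body, named
def stepA (st : PySem.Set Int × List (Int × Int × Int)) (item : Int × Int × Int) :
    PySem.Set Int × List (Int × Int × Int) :=
  if st.1.contains item.2.2 then st
  else (st.1.add item.2.2, st.2 ++ [item])

theorem stepA_of_mem {s : PySem.Set Int} {x : Int × Int × Int}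
    (r : List (Int × Int × Int)) (h : x.2.2 ∈ s) : stepA (s, r) x = (s, r) := by
  simp [stepA, h]

theorem stepA_of_not_mem {s : PySem.Set Int} {x : Int × Int × Int}
    (r : List (Int × Int × Int)) (h : x.2.2 ∉ s) :
    stepA (s, r) x = (s.add x.2.2, r ++ [x]) := by
  simp [stepA, h]

theorem uniq_eq_foldl_stepA (l : List (Int × Int × Int)) :
    uniq_elements l = (l.foldl stepA (PySem.Set.empty, [])).2 := rfl

-- the result component of A's fold only grows by appending
theorem foldA_acc (l : List (Int × Int × Int)) (s : PySem.Set Int)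
    (r : List (Int × Int × Int)) :
    l.foldl stepA (s, r) =
      ((l.foldl stepA (s, [])).1, r ++ (l.foldl stepA (s, [])).2) := by
  induction l generalizing s r with
  | nil => simp
  | cons x xs ih =>
    simp only [List.foldl_cons]
    by_cases h : x.2.2 ∈ s
    · rw [stepA_of_mem r h, stepA_of_mem [] h]
      exact ih s r
    · rw [stepA_of_not_mem r h, stepA_of_not_mem [] h]
      simp only [List.nil_append]
      rw [ih (s.add x.2.2) (r ++ [x]), ih (s.add x.2.2) [x]]
      simp

-- once key k is marked seen, A's fold ignores all key-k items: it behaves like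
-- the fold on the key-k-filtered list, under any seen set agreeing off k
theorem foldA_filter (k : Int) (l : List (Int × Int × Int)) :
    ∀ (s₁ s₂ : PySem.Set Int),
      k ∈ s₁ →
      (∀ a, a ≠ k → (a ∈ s₁ ↔ a ∈ s₂)) →
      (l.foldl stepA (s₁, [])).2 =
        ((l.filter (fun x => x.2.2 ≠ k)).foldl stepA (s₂, [])).2 := by
  induction l with
  | nil => intro s₁ s₂ _ _; simp
  | cons x xs ih =>
    intro s₁ s₂ h₁ h₂
    by_cases hk : x.2.2 = k
    · have hdrop : (fun x : Int × Int × Int => decide (x.2.2 ≠ k)) x = false := by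
        simp [hk]
      rw [List.filter_cons_of_neg (by simp [hk]), List.foldl_cons,
        stepA_of_mem [] (hk ▸ h₁)]
      exact ih s₁ s₂ h₁ h₂
    · rw [List.filter_cons_of_pos (by simp [hk]), List.foldl_cons, List.foldl_cons]
      by_cases h : x.2.2 ∈ s₁
      · rw [stepA_of_mem [] h, stepA_of_mem [] ((h₂ _ hk).mp h)]
        exact ih s₁ s₂ h₁ h₂
      · rw [stepA_of_not_mem [] h,
          stepA_of_not_mem [] (fun hc => h ((h₂ _ hk).mpr hc))]
        simp only [List.nil_append]
        rw [foldA_acc xs _ [x], foldA_acc (xs.filter _) _ [x]]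
      -- strip the common [x] prefix, then apply IH with the enlarged seen sets
        have := ih (s₁.add x.2.2) (s₂.add x.2.2)
          (by rw [PySem.Set.mem_add]; exact Or.inl h₁)
          (by intro a ha; rw [PySem.Set.mem_add, PySem.Set.mem_add, h₂ a ha])
        simp only [this]
  
-- B's loop with accumulator r equals r ++ (loop from empty accumulator)
theorem uniqAltLoop_acc (n : ℕ) :
    ∀ (rest : List (Int × Int × Int)), rest.length ≤ n →
      ∀ (r : List (Int × Int × Int)), uniqAltLoop r rest = r ++ uniqAltLoop [] rest := by
  induction n with
  | zero =>
    intro rest h r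
    have : rest = [] := List.eq_nil_of_length_eq_zero (Nat.le_zero.mp h)
    subst this; rw [uniqAltLoop_nil, uniqAltLoop_nil]; simp
  | succ n ihm =>
    intro rest h r
    match rest with
    | [] => rw [uniqAltLoop_nil, uniqAltLoop_nil]; simp
    | y :: ys =>
      have hlen : (ys.filter (fun x => x.2.2 ≠ y.2.2)).length ≤ n :=
        le_trans (List.length_filter_le _ ys)
          (Nat.lt_succ_iff.mp (lt_of_lt_of_le (by simp) h))
      rw [uniqAltLoop_cons, uniqAltLoop_cons, ihm _ hlen (r ++ [y])]
      simp only [List.nil_append]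
      rw [ihm _ hlen [y]]
      simp

-- main equivalence, by strong induction on the list length
theorem uniq_eq_alt (n : ℕ) :
    ∀ (l : List (Int × Int × Int)), l.length ≤ n →
      (l.foldl stepA (PySem.Set.empty, [])).2 = uniqAltLoop [] l := by
  induction n with
  | zero =>
    intro l hl
    have : l = [] := List.eq_nil_of_length_eq_zero (Nat.le_zero.mp hl)
    subst this; rw [uniqAltLoop_nil]; simp
  | succ n ih =>
    intro l hl
    match l with
    | [] => rw [uniqAltLoop_nil]; simp
    | x :: xs =>
      have hempty : x.2.2 ∉ (PySem.Set.empty : PySem.Set Int) := by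
        simp [PySem.Set.empty]
      rw [List.foldl_cons, stepA_of_not_mem [] hempty, foldA_acc]
      have hkey : x.2.2 ∈ (PySem.Set.empty : PySem.Set Int).add x.2.2 := by
        rw [PySem.Set.mem_add]; exact Or.inr rfl
      have hagree : ∀ a, a ≠ x.2.2 →
          (a ∈ (PySem.Set.empty : PySem.Set Int).add x.2.2 ↔
            a ∈ (PySem.Set.empty : PySem.Set Int)) := by
        intro a ha; rw [PySem.Set.mem_add]; simp [ha, PySem.Set.empty]
      rw [foldA_filter x.2.2 xs _ _ hkey hagree]
      have hlen : (xs.filter (fun y => y.2.2 ≠ x.2.2)).length ≤ n :=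
        le_trans (List.length_filter_le _ xs)
          (Nat.lt_succ_iff.mp (lt_of_lt_of_le (by simp) hl))
      rw [ih _ hlen, uniqAltLoop_cons]
      simp only [List.nil_append]
      rw [uniqAltLoop_acc (xs.filter _).length _ le_rfl [x]]

-- ===== VERDICT =====
theorem uniq_elements_spec : Claim_equal_uniq_elements := by
  intro l _
  show uniq_elements l = uniq_elements_alt l
  rw [uniq_eq_foldl_stepA, uniq_elements_alt]
  exact uniq_eq_alt l.length l le_rfl
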